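-- pv_equiv track=rewrite | github.com/pisterlabs/promptset | data/scraping/repos/datovar4~Ai_Literature_Review_Suite/pdf_interrogation.py | text_to_chunks
-- ===== SOURCE A (Python) =====
-- def text_to_chunks(texts, word_length=250, start_page=1):
--     text_toks = [t.split(' ') for t in texts]
--     page_nums = []
--     chunks = []
--
--     for idx, words in enumerate(text_toks):
--         for i in range(0, len(words), word_length):
--             chunk = words[i:i+word_length]
--             if (i+word_length) > len(words) and (len(chunk) < word_length) and (
--                     len(text_toks) != (idx+1)):
--                 text_toks[idx+1] = chunk + text_toks[idx+1]
--                 continue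
--             chunk = ' '.join(chunk).strip()
--             chunk = f'[Page no. {idx+start_page}]' + \
--                 ' ' + '"' + chunk + '"'
--             chunks.append(chunk)
--     return chunks
-- ===== SOURCE B (Python) =====
-- def text_to_chunks(texts, word_length=250, start_page=1):
--     # One pass: flatten all texts into a single (word, page-index) stream, then
--     # cut the stream into word_length slices; each slice is labelled with the
--     # page of its last word (A's carry loop produces exactly these slices).
--     stream = [(w, idx) for idx, t in enumerate(texts) for w in t.split(' ')]
--     chunks = []
--     for i in range(0, len(stream), word_length):
--         piece = stream[i:i + word_length]
--         body = ' '.join(w for w, _ in piece).strip()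
--         chunks.append(f'[Page no. {piece[-1][1] + start_page}] "{body}"')
--     return chunks
-- ===== Notes on version B (the rewrite author's own statement) =====
-- stated objective: simpler
-- what changed: Replaces the page-by-page loop that mutates the token list (carrying a partial chunk into the next page's word list) by a single flattened (word, page) stream cut into word_length slices, labelling each slice with the page of its last word.
-- outside the precondition, e.g. on text_to_chunks([], 0, 0): A returns [], B raises ValueError; on text_to_chunks(['a b'], 0, 1): A raises ValueError, B raises ValueError
import Mathlib
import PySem

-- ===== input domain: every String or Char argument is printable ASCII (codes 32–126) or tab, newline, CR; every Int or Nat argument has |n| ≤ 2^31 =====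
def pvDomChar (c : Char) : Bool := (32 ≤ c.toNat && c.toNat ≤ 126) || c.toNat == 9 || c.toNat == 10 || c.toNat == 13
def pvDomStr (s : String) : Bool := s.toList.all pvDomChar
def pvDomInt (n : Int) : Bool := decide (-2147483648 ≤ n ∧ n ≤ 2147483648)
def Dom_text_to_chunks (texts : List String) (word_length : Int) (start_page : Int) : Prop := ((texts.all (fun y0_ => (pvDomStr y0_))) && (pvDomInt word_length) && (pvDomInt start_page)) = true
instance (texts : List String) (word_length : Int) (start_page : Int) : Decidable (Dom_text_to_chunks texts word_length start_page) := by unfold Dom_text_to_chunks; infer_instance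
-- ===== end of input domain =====

-- B replaces A's page loop with token-list mutation by one flattened (word, page) stream cut
-- into word_length slices (objective: simpler). A mutates its local list only; no caller-visible
-- side effects. Equivalence is proved for word_length ≠ 0 (both raise ValueError at 0).

-- ===== PORT A =====
-- t.split(' '): sep is the nonempty literal ' ', so split? is always `some` — `.getD []` is exact.
def pvSplitSp (t : String) : List String := (PySem.Str.split? t " ").getD []

-- the f-string '[Page no. {page}]' + ' ' + '"' + body + '"' (concatenation via PySem.Str.join "")
def pvFmtA (page : Int) (body : String) : String :=
  PySem.Str.join "" ["[Page no. ", PySem.Int.toStr page, "] \"", body, "\""]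

-- inner `for i in range(0, len(words), word_length)` loop of A; state = (text_toks, chunks).
-- `text_toks[idx+1]` is read/written with getD/set: the branch guarantees idx+1 is in range.
def pvInnerA (word_length start_page : Int) (idx : Nat) (words : List String)
    (st : List (List String) × List String) : List (List String) × List String :=
  (PySem.List.pyRange 0 (words.length : Int) word_length).foldl
    (fun st i =>
      let chunk := PySem.List.slice words (some i) (some (i + word_length))
      if i + word_length > (words.length : Int) ∧ (chunk.length : Int) < word_length ∧
          (st.1.length : Int) ≠ (idx : Int) + 1 then
        (st.1.set (idx + 1) (chunk ++ st.1.getD (idx + 1) []), st.2)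
      else
        (st.1, st.2 ++ [pvFmtA ((idx : Int) + start_page) (PySem.Str.strip (PySem.Str.join " " chunk))]))
    st

-- outer `for idx, words in enumerate(text_toks)` loop: text_toks is mutated at idx+1 while being
-- iterated, so Python re-reads text_toks[idx] each step; fuel = number of remaining indices.
def pvOuterA (word_length start_page : Int) : Nat → Nat → List (List String) × List String → List String
  | 0, _, st => st.2
  | n + 1, idx, st =>
      pvOuterA word_length start_page n (idx + 1)
        (pvInnerA word_length start_page idx (st.1.getD idx []) st)

def text_to_chunks (texts : List String) (word_length : Int) (start_page : Int) : List String :=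
  let text_toks := texts.map pvSplitSp
  pvOuterA word_length start_page text_toks.length 0 (text_toks, [])

-- ===== PORT B =====
-- piece[-1]: the branch only runs with piece nonempty, so the default of pyGetD is never used.
def text_to_chunks_alt (texts : List String) (word_length : Int) (start_page : Int) : List String :=
  let stream := (PySem.List.enumerate texts).flatMap
    (fun p => (pvSplitSp p.2).map (fun w => (w, p.1)))
  (PySem.List.pyRange 0 (stream.length : Int) word_length).foldl
    (fun chunks i =>
      let piece := PySem.List.slice stream (some i) (some (i + word_length))
      chunks ++ [pvFmtA ((PySem.List.pyGetD piece (-1) ("", 0)).2 + start_page)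
        (PySem.Str.strip (PySem.Str.join " " (piece.map (·.1))))])
    []

-- ===== PRECONDITION & SPEC =====
-- Pre_ excludes word_length = 0: range(0, n, 0) raises ValueError in both programs whenever a
-- range is evaluated (A evaluates none only on empty texts, where it returns [] but B raises).
def Pre_text_to_chunks (texts : List String) (word_length : Int) (start_page : Int) : Prop :=
  word_length ≠ 0
instance (texts : List String) (word_length : Int) (start_page : Int) : Decidable (Pre_text_to_chunks texts word_length start_page) := by unfold Pre_text_to_chunks; infer_instance

def pvWitness_text_to_chunks : List String × Int × Int := (["a b c", "d e"], 2, 1)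

def Spec_text_to_chunks (texts : List String) (word_length : Int) (start_page : Int) (out : List String) : Prop := out = text_to_chunks_alt texts word_length start_page
instance (texts : List String) (word_length : Int) (start_page : Int) (out : List String) : Decidable (Spec_text_to_chunks texts word_length start_page out) := by unfold Spec_text_to_chunks; infer_instance

-- ===== CLAIM (what is proved, stated in full; the proofs are below) =====
def Claim_equal_text_to_chunks : Prop := ∀ (texts : List String) (word_length : Int) (start_page : Int), Dom_text_to_chunks texts word_length start_page → Pre_text_to_chunks texts word_length start_page → Spec_text_to_chunks texts word_length start_page (text_to_chunks texts word_length start_page)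

-- ===== LEMMAS AND PROOFS =====

-- emitted strings of the two algorithms
def pvEmitA (sp idx : Int) (ws : List String) : String :=
  pvFmtA (idx + sp) (PySem.Str.strip (PySem.Str.join " " ws))

def pvEmitS (sp : Int) (piece : List (String × Int)) : String :=
  pvFmtA ((PySem.List.pyGetD piece (-1) ("", 0)).2 + sp)
    (PySem.Str.strip (PySem.Str.join " " (piece.map (·.1))))

-- B's algorithm as a recursion on the stream, chunk size w+1
def pvStreamRec (w : Nat) (sp : Int) : List (String × Int) → List String
  | [] => []
  | x :: s => pvEmitS sp (x :: s.take w) :: pvStreamRec w sp (s.drop w)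
termination_by s => s.length
decreasing_by all_goals (simp; try omega)

-- split a word list into its full (w+1)-chunks and the (≤ w long) leftover
def pvSplitFull (w : Nat) : List String → List (List String) × List String
  | [] => ([], [])
  | x :: s =>
      if s.length < w then ([], x :: s)
      else
        let pr := pvSplitFull w (s.drop w)
        ((x :: s.take w) :: pr.1, pr.2)
termination_by l => l.length
decreasing_by all_goals (simp; try omega)

-- A's algorithm as a recursion on the pages, carrying the leftover forward
def pvARec (w : Nat) (sp : Int) : Int → List (List String) → List String
  | _, [] => []
  | idx, words :: rest =>
      let pr := pvSplitFull w words
      pr.1.map (pvEmitA sp idx) ++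
        (if pr.2 = [] then pvARec w sp (idx + 1) rest
         else
           match rest with
           | [] => [pvEmitA sp idx pr.2]
           | r :: rs => pvARec w sp (idx + 1) ((pr.2 ++ r) :: rs))
termination_by _ l => l.length
decreasing_by all_goals (simp; try omega)

-- the labelled word stream of a list of pages
def pvLabel (i : Int) : List (List String) → List (String × Int)
  | [] => []
  | p :: ps => p.map (fun x => (x, i)) ++ pvLabel (i + 1) ps

-- ---- small facts ----

theorem pv_pyRange_nil_nonpos (b s : Int) (hs : s < 0) (hb : 0 ≤ b) :
    PySem.List.pyRange 0 b s = [] := by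
  unfold PySem.List.pyRange
  rw [if_neg (by omega : ¬ s = 0)]
  rw [if_neg (by omega : ¬ 0 < s), if_neg (by omega : ¬ b < 0)]
  simp

theorem pv_pyRange_self (a s : Int) (hs : 0 < s) : PySem.List.pyRange a a s = [] := by
  rw [PySem.List.pyRange_of_pos _ _ hs, if_neg (lt_irrefl a)]
  simp

theorem pv_pyRange_pos_cons {a b s : Int} (hs : 0 < s) (hab : a < b) :
    PySem.List.pyRange a b s = a :: PySem.List.pyRange (a + s) b s := by
  rw [PySem.List.pyRange_of_pos _ _ hs, PySem.List.pyRange_of_pos _ _ hs, if_pos hab]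
  by_cases h : a + s < b
  · rw [if_pos h]
    have he : (b - a + s - 1) = (b - (a + s) + s - 1) + 1 * s := by ring
    have h2 : ((b - a + s - 1) / s).toNat = ((b - (a + s) + s - 1) / s).toNat + 1 := by
      rw [he, Int.add_mul_ediv_right _ _ (by omega : s ≠ 0)]
      have h3 : 0 ≤ (b - (a + s) + s - 1) / s := Int.ediv_nonneg (by omega) (by omega)
      omega
    rw [h2, List.range_succ_eq_map]
    simp only [List.map_cons, List.map_map, List.cons.injEq]
    refine ⟨by push_cast; ring, ?_⟩
    apply List.map_congr_left
    intro k _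
    simp only [Function.comp_apply]
    push_cast
    ring
  · rw [if_neg h]
    have h1 : (b - a + s - 1) / s = 1 := by
      have := (PySem.Int.floordiv_eq_iff_of_pos (a := b - a + s - 1) (b := s) (q := 1) hs).2
        (by constructor <;> omega)
      rwa [PySem.Int.floordiv_eq_ediv_of_pos hs] at this
    rw [h1]
    simp

theorem pv_pyRange_shift (b s : Int) (hs : 0 < s) :
    PySem.List.pyRange s b s = (PySem.List.pyRange 0 (b - s) s).map (fun i => s + i) := by
  rw [PySem.List.pyRange_of_pos _ _ hs, PySem.List.pyRange_of_pos _ _ hs]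
  have he : b - s + s - 1 = b - s - 0 + s - 1 := by ring
  by_cases hb : s < b
  · rw [if_pos hb, if_pos (by omega), he]
    simp only [List.map_map, sub_zero]
    apply List.map_congr_left
    intro k _
    simp only [Function.comp_apply]
    ring
  · rw [if_neg hb, if_neg (by omega)]
    simp

theorem pv_slice_shift {α : Type} (xs : List α) (i s : Int) (hi : 0 ≤ i) (hs : 0 ≤ s) :
    PySem.List.slice xs (some (s + i)) (some (s + i + s))
      = PySem.List.slice (xs.drop s.toNat) (some i) (some (i + s)) := by
  rw [PySem.List.slice_toNat _ (by omega) (by omega), PySem.List.slice_toNat _ hi (by omega),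
    List.drop_drop]
  have h1 : (s + i).toNat = s.toNat + i.toNat := by omega
  have h2 : (s + i + s).toNat - (s + i).toNat = (i + s).toNat - i.toNat := by omega
  rw [h1]
  congr 1
  omega

theorem pv_pyGetD_concat {α : Type} (xs : List α) (x d : α) :
    PySem.List.pyGetD (xs ++ [x]) (-1) d = x := by
  simp only [PySem.List.pyGetD, PySem.List.pyGet?, PySem.List.pyIdx?]
  rw [if_neg (by omega), if_pos (by simp)]
  simp

theorem pv_last_label (cl : List (String × Int)) (p : List String) (idx : Int) (hp : p ≠ []) :
    (PySem.List.pyGetD (cl ++ p.map (fun x => (x, idx))) (-1) ("", 0)).2 = idx := by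
  obtain ⟨p', z, rfl⟩ := p.eq_nil_or_concat.resolve_left hp
  rw [List.concat_eq_append, List.map_append, List.map_singleton, ← List.append_assoc,
    pv_pyGetD_concat]

theorem pv_go_ne_nil (sep : List Char) : ∀ (fuel : Nat) (l cur : List Char)
    (acc : List (List Char)), PySem.Chars.splitOn.go sep fuel l cur acc ≠ [] := by
  intro fuel
  induction fuel with
  | zero => intro l cur acc; rw [PySem.Chars.splitOn.go]; simp
  | succ n ih =>
    intro l cur acc
    cases l with
    | nil => rw [PySem.Chars.splitOn.go]; simp; omega
    | cons c rest =>
      rw [PySem.Chars.splitOn.go]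
      split
      · exact ih _ _ _
      · exact ih _ _ _

theorem pv_split_ne_nil (t : String) : pvSplitSp t ≠ [] := by
  unfold pvSplitSp PySem.Str.split?
  rw [PySem.Chars.split?]
  rw [if_neg (by decide)]
  simp only [Option.map_some, Option.getD_some, ne_eq, List.map_eq_nil_iff]
  unfold PySem.Chars.splitOn
  exact pv_go_ne_nil _ _ _ _ _

theorem pv_splitFull_small (w : Nat) (l : List String) (h0 : l ≠ []) (h : l.length ≤ w) :
    pvSplitFull w l = ([], l) := by
  cases l with
  | nil => simp at h0
  | cons x s =>
    rw [pvSplitFull, if_pos (by simp at h; omega)]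

theorem pv_splitFull_big (w : Nat) (l : List String) (h : w < l.length) :
    pvSplitFull w l
      = (l.take (w + 1) :: (pvSplitFull w (l.drop (w + 1))).1,
         (pvSplitFull w (l.drop (w + 1))).2) := by
  cases l with
  | nil => simp at h
  | cons x s =>
    rw [pvSplitFull, if_neg (by simp at h; omega)]
    simp [List.take_succ_cons, List.drop_succ_cons]

-- ---- B side: the fold over range(0, len(stream), wl) is pvStreamRec ----

theorem pv_B_fold (wl sp : Int) (w : Nat) (hw : wl.toNat = w + 1) (hwl : 0 < wl) :
    ∀ (n : Nat) (stream : List (String × Int)) (acc : List String), stream.length ≤ n →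
    List.foldl
      (fun chunks i =>
        chunks ++ [pvFmtA
          ((PySem.List.pyGetD (PySem.List.slice stream (some i) (some (i + wl))) (-1) ("", 0)).2
            + sp)
          (PySem.Str.strip (PySem.Str.join " "
            ((PySem.List.slice stream (some i) (some (i + wl))).map (·.1))))])
      acc (PySem.List.pyRange 0 (stream.length : Int) wl)
      = acc ++ pvStreamRec w sp stream := by
  intro n
  induction n with
  | zero =>
    intro stream acc h
    have hnil : stream = [] := List.eq_nil_of_length_eq_zero (by omega)
    subst hnil
    simp [pv_pyRange_self 0 wl hwl, pvStreamRec]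
  | succ n ih =>
    intro stream acc h
    cases stream with
    | nil => simp [pv_pyRange_self 0 wl hwl, pvStreamRec]
    | cons x s =>
      rw [pv_pyRange_pos_cons hwl (by exact_mod_cast Nat.succ_pos s.length : (0 : Int) < ((x :: s).length : Int))]
      simp only [List.foldl_cons, zero_add]
      have hpiece : PySem.List.slice (x :: s) (some 0) (some wl) = x :: s.take w := by
        rw [PySem.List.slice_zero_start, PySem.List.slice_to _ hwl.le, hw]
        simp
      rw [hpiece]
      by_cases hsl : s.length < w
      · have hr : PySem.List.pyRange wl ((x :: s).length : Int) wl = [] := by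
          rw [PySem.List.pyRange_of_pos _ _ hwl, if_neg (by simp; omega)]
          simp
        rw [hr, List.foldl_nil]
        have hd : s.drop w = [] := by
          rw [List.drop_eq_nil_iff]
          omega
        rw [pvStreamRec, hd, pvStreamRec]
        simp [pvEmitS]
      · rw [show ((x :: s).length : Int) = (s.length + 1 : Int) by simp,
          pv_pyRange_shift _ wl hwl, List.foldl_map]
        rw [PySem.List.foldl_congr_mem _ _
          (fun chunks i =>
            chunks ++ [pvFmtA
              ((PySem.List.pyGetD (PySem.List.slice (s.drop w) (some i) (some (i + wl)))
                  (-1) ("", 0)).2 + sp)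
              (PySem.Str.strip (PySem.Str.join " "
                ((PySem.List.slice (s.drop w) (some i) (some (i + wl))).map (·.1))))]) _
          (by
            intro acc' i hi
            have hi0 : 0 ≤ i := by
              have := (PySem.List.mem_pyRange_iff_of_pos hwl i).1 hi
              omega
            have hss : PySem.List.slice (x :: s) (some (wl + i)) (some (wl + i + wl))
                = PySem.List.slice ((x :: s).drop wl.toNat) (some i) (some (i + wl)) :=
              pv_slice_shift (x :: s) i wl hi0 hwl.le
            rw [hss, hw, List.drop_succ_cons])]
        have hb : (s.length : Int) + 1 - wl = ((s.drop w).length : Int) := by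
          simp only [List.length_drop]
          omega
        rw [hb, ih (s.drop w) _ (by simp only [List.length_drop]; simp at h; omega)]
        rw [pvStreamRec]
        simp [pvEmitS]

-- ---- A side: the inner loop is pvSplitFull ----

theorem pv_inner_spec (wl sp : Int) (w : Nat) (hw : wl.toNat = w + 1) (hwl : 0 < wl)
    (idx : Nat) :
    ∀ (n : Nat) (words : List String) (toks : List (List String)) (chunks : List String),
      words.length ≤ n →
      pvInnerA wl sp idx words (toks, chunks)
        = (let pr := pvSplitFull w words
           if pr.2 = [] then (toks, chunks ++ pr.1.map (pvEmitA sp (idx : Int)))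
           else if (toks.length : Int) = (idx : Int) + 1 then
             (toks, chunks ++ pr.1.map (pvEmitA sp (idx : Int)) ++ [pvEmitA sp (idx : Int) pr.2])
           else
             (toks.set (idx + 1) (pr.2 ++ toks.getD (idx + 1) []),
              chunks ++ pr.1.map (pvEmitA sp (idx : Int)))) := by
  have hwli : wl = (w : Int) + 1 := by omega
  intro n
  induction n with
  | zero =>
    intro words toks chunks h
    have hnil : words = [] := List.eq_nil_of_length_eq_zero (by omega)
    subst hnil
    unfold pvInnerA
    simp [pv_pyRange_self 0 wl hwl, pvSplitFull]
  | succ n ih =>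
    intro words toks chunks h
    cases words with
    | nil =>
      unfold pvInnerA
      simp [pv_pyRange_self 0 wl hwl, pvSplitFull]
    | cons x s =>
      unfold pvInnerA
      rw [pv_pyRange_pos_cons hwl
        (by exact_mod_cast Nat.succ_pos s.length : (0 : Int) < ((x :: s).length : Int))]
      simp only [List.foldl_cons, zero_add]
      have hpiece : PySem.List.slice (x :: s) (some 0) (some wl) = x :: s.take w := by
        rw [PySem.List.slice_zero_start, PySem.List.slice_to _ hwl.le, hw]
        simp
      rw [hpiece]
      by_cases hsl : s.length < w
      · -- partial first chunk; it is also the last index of the range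
        have htk : s.take w = s := List.take_of_length_le (by omega)
        have hr : PySem.List.pyRange wl ((x :: s).length : Int) wl = [] := by
          rw [PySem.List.pyRange_of_pos _ _ hwl, if_neg (by simp; omega)]
          simp
        have hsf : pvSplitFull w (x :: s) = ([], x :: s) :=
          pv_splitFull_small w (x :: s) (by simp) (by simp; omega)
        by_cases htoks : (toks.length : Int) = (idx : Int) + 1
        · rw [if_neg (by
            rw [htk]
            intro hcond
            exact hcond.2.2 htoks)]
          rw [hr, List.foldl_nil, hsf]
          simp [htk, htoks, pvEmitA]
        · rw [if_pos (by
            rw [htk]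
            refine ⟨by simp; omega, by simp; omega, htoks⟩)]
          rw [hr, List.foldl_nil, hsf]
          simp [htk, htoks]
      · -- full first chunk
        rw [if_neg (by
          intro hcond
          have := hcond.1
          simp at this
          omega)]
        rw [show ((x :: s).length : Int) = (s.length + 1 : Int) by simp,
          pv_pyRange_shift _ wl hwl, List.foldl_map]
        rw [PySem.List.foldl_congr_mem _ _
          (fun st i =>
            let chunk := PySem.List.slice (s.drop w) (some i) (some (i + wl))
            if i + wl > ((s.drop w).length : Int) ∧ (chunk.length : Int) < wl ∧
                (st.1.length : Int) ≠ (idx : Int) + 1 then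
              (st.1.set (idx + 1) (chunk ++ st.1.getD (idx + 1) []), st.2)
            else
              (st.1, st.2 ++ [pvFmtA ((idx : Int) + sp)
                (PySem.Str.strip (PySem.Str.join " " chunk))])) _
          (by
            intro st i hi
            have hi0 : 0 ≤ i := by
              have := (PySem.List.mem_pyRange_iff_of_pos hwl i).1 hi
              omega
            have hss : PySem.List.slice (x :: s) (some (wl + i)) (some (wl + i + wl))
                = PySem.List.slice ((x :: s).drop wl.toNat) (some i) (some (i + wl)) :=
              pv_slice_shift (x :: s) i wl hi0 hwl.le
            rw [hw, List.drop_succ_cons] at hss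
            rw [hss]
            have hc : (wl + i + wl > (s.length : Int) + 1)
                ↔ (i + wl > ((s.drop w).length : Int)) := by
              simp only [List.length_drop]
              omega
            rw [if_congr (and_congr hc Iff.rfl) rfl rfl])]
        have hb : (s.length : Int) + 1 - wl = ((s.drop w).length : Int) := by
          simp only [List.length_drop]
          omega
        rw [hb]
        have hfold : List.foldl
            (fun st i =>
              let chunk := PySem.List.slice (s.drop w) (some i) (some (i + wl))
              if i + wl > ((s.drop w).length : Int) ∧ (chunk.length : Int) < wl ∧
                  (st.1.length : Int) ≠ (idx : Int) + 1 then
                (st.1.set (idx + 1) (chunk ++ st.1.getD (idx + 1) []), st.2)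
              else
                (st.1, st.2 ++ [pvFmtA ((idx : Int) + sp)
                  (PySem.Str.strip (PySem.Str.join " " chunk))]))
            (toks, chunks ++ [pvFmtA ((idx : Int) + sp)
              (PySem.Str.strip (PySem.Str.join " " (x :: s.take w)))])
            (PySem.List.pyRange 0 ((s.drop w).length : Int) wl)
            = pvInnerA wl sp idx (s.drop w)
              (toks, chunks ++ [pvFmtA ((idx : Int) + sp)
                (PySem.Str.strip (PySem.Str.join " " (x :: s.take w)))]) := rfl
        rw [hfold, ih (s.drop w) toks _ (by simp only [List.length_drop]; simp at h; omega)]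
        have hsf := pv_splitFull_big w (x :: s) (by simp; omega)
        rw [show (x :: s).drop (w + 1) = s.drop w from List.drop_succ_cons .., show (x :: s).take (w + 1) = x :: s.take w from rfl] at hsf
        rw [hsf]
        simp only [List.map_cons, List.append_assoc, List.cons_append, List.nil_append]
        by_cases h2 : (pvSplitFull w (s.drop w)).2 = [] <;>
          by_cases h3 : (toks.length : Int) = (idx : Int) + 1 <;>
            simp [h2, h3, pvEmitA]

-- ---- A side: the outer loop is pvARec ----

theorem pv_outer (wl sp : Int) (w : Nat) (hw : wl.toNat = w + 1) (hwl : 0 < wl) :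
    ∀ (n : Nat) (rest done : List (List String)) (chunks : List String), rest.length = n →
      pvOuterA wl sp rest.length done.length (done ++ rest, chunks)
        = chunks ++ pvARec w sp (done.length : Int) rest := by
  intro n
  induction n with
  | zero =>
    intro rest done chunks hn
    have : rest = [] := List.eq_nil_of_length_eq_zero hn
    subst this
    simp [pvOuterA, pvARec]
  | succ n ih =>
    intro rest done chunks hn
    cases rest with
    | nil => simp at hn
    | cons words rs =>
      rw [show (words :: rs).length = rs.length + 1 from rfl, pvOuterA]
      have hget : (done ++ words :: rs).getD done.length [] = words := by
        rw [List.getD_eq_getElem?_getD, List.getElem?_append_right (le_refl _)]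
        simp
      rw [hget,
        pv_inner_spec wl sp w hw hwl done.length words.length words _ chunks (le_refl _)]
      rw [pvARec.eq_def]
      by_cases h2 : (pvSplitFull w words).2 = []
      · simp only [h2, if_true]
        have hre : done ++ words :: rs = (done ++ [words]) ++ rs := by simp
        have hlen : done.length + 1 = (done ++ [words]).length := by simp
        rw [hre, hlen, ih rs (done ++ [words]) _ (by simpa using hn)]
        simp only [List.length_append, List.length_cons, List.length_nil]
        rw [show (((done.length + (0 + 1) : Nat)) : Int) = (done.length : Int) + 1 by omega]
        simp
      · rw [if_neg h2]
        cases rs with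
        | nil =>
          have hc : (((done ++ [words]).length : Int)) = (done.length : Int) + 1 := by
            push_cast
            simp
          rw [if_pos hc]
          rw [show ([] : List (List String)).length = 0 from rfl, pvOuterA]
          simp [h2]
        | cons r rs' =>
          rw [if_neg (by
            simp only [List.length_append, List.length_cons]
            push_cast
            omega)]
          have hgetn : (done ++ words :: r :: rs').getD (done.length + 1) [] = r := by
            rw [List.getD_eq_getElem?_getD, List.getElem?_append_right (by omega)]
            simp
          have hset : (done ++ words :: r :: rs').set (done.length + 1)
              ((pvSplitFull w words).2 ++ r)
              = (done ++ [words]) ++ ((pvSplitFull w words).2 ++ r) :: rs' := by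
            rw [List.set_append_right _ _ (by omega)]
            simp
          rw [hgetn, hset]
          have hlen2 : done.length + 1 = (done ++ [words]).length := by simp
          rw [show (r :: rs').length = (((pvSplitFull w words).2 ++ r) :: rs').length
            from by simp, hlen2,
            ih _ (done ++ [words]) _ (by simpa using hn)]
          simp only [List.length_append, List.length_cons, List.length_nil]
          rw [show (((done.length + (0 + 1) : Nat)) : Int) = (done.length : Int) + 1 by omega]
          simp [h2]

-- ---- the bridge: pvStreamRec of the labelled stream is pvARec ----

theorem pv_streamRec_long (w : Nat) (sp : Int) (S tail : List (String × Int))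
    (h : w < S.length) :
    pvStreamRec w sp (S ++ tail)
      = pvEmitS sp (S.take (w + 1)) :: pvStreamRec w sp (S.drop (w + 1) ++ tail) := by
  cases S with
  | nil => simp at h
  | cons y S' =>
    rw [List.cons_append, pvStreamRec]
    simp only [List.length_cons] at h
    rw [List.take_append_of_le_length (by omega), List.drop_append_of_le_length (by omega)]
    simp

theorem pv_streamRec_short (w : Nat) (sp : Int) (S : List (String × Int))
    (h0 : S ≠ []) (h : S.length ≤ w + 1) :
    pvStreamRec w sp S = [pvEmitS sp S] := by
  cases S with
  | nil => simp at h0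
  | cons y S' =>
    rw [pvStreamRec]
    simp only [List.length_cons] at h
    rw [List.take_of_length_le (by omega), List.drop_of_length_le (by omega), pvStreamRec]

theorem pv_emitS_eq (sp : Int) (cl : List (String × Int)) (p : List String) (idx : Int)
    (hp : p ≠ []) :
    pvEmitS sp (cl ++ p.map (fun x => (x, idx))) = pvEmitA sp idx (cl.map Prod.fst ++ p) := by
  unfold pvEmitS pvEmitA
  rw [pv_last_label cl p idx hp,
    show (cl ++ p.map (fun x => (x, idx))).map (·.1) = cl.map Prod.fst ++ p by
      simp [List.map_map, Function.comp_def]]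

theorem pv_MInner (w : Nat) (sp : Int) :
    ∀ (n : Nat) (cl : List (String × Int)) (p : List String) (idx : Int)
      (tail : List (String × Int)),
      cl.length + p.length ≤ n → cl.length ≤ w → p ≠ [] →
      ∃ lLab : List (String × Int),
        pvStreamRec w sp (cl ++ p.map (fun x => (x, idx)) ++ tail)
          = (pvSplitFull w (cl.map Prod.fst ++ p)).1.map (pvEmitA sp idx)
              ++ pvStreamRec w sp (lLab ++ tail)
        ∧ lLab.map Prod.fst = (pvSplitFull w (cl.map Prod.fst ++ p)).2
        ∧ lLab.length ≤ w
        ∧ (lLab ≠ [] → (PySem.List.pyGetD lLab (-1) ("", 0)).2 = idx) := by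
  intro n
  induction n with
  | zero =>
    intro cl p idx tail h hcl hp
    cases p with
    | nil => exact absurd rfl hp
    | cons a b => simp at h
  | succ n ih =>
    intro cl p idx tail h hcl hp
    by_cases hsmall : cl.length + p.length ≤ w
    · have hne : cl.map Prod.fst ++ p ≠ [] := by
        cases p with
        | nil => exact absurd rfl hp
        | cons a b => simp
      rw [pv_splitFull_small w _ hne (by simp; omega)]
      refine ⟨cl ++ p.map (fun x => (x, idx)), ?_, ?_, by simp; omega,
        fun _ => pv_last_label cl p idx hp⟩
      · simp [List.append_assoc]
      · simp [List.map_map, Function.comp_def]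
    · have hSlen : w < (cl ++ p.map (fun x => (x, idx))).length := by simp; omega
      rw [pv_streamRec_long w sp _ tail hSlen]
      -- the first chunk
      have hk1 : 1 ≤ w + 1 - cl.length := by omega
      have htake : (cl ++ p.map (fun x => (x, idx))).take (w + 1)
          = cl ++ (p.take (w + 1 - cl.length)).map (fun x => (x, idx)) := by
        rw [List.take_append, List.take_of_length_le (by omega), List.map_take]
      have hdrop : (cl ++ p.map (fun x => (x, idx))).drop (w + 1)
          = (p.drop (w + 1 - cl.length)).map (fun x => (x, idx)) := by
        rw [List.drop_append, List.drop_of_length_le (by omega), List.map_drop]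
        simp
      have htne : p.take (w + 1 - cl.length) ≠ [] := by
        cases p with
        | nil => exact absurd rfl hp
        | cons a b =>
          cases hkk : w + 1 - cl.length with
          | zero => omega
          | succ k => simp
      have hemit : pvEmitS sp ((cl ++ p.map (fun x => (x, idx))).take (w + 1))
          = pvEmitA sp idx ((cl.map Prod.fst ++ p).take (w + 1)) := by
        have hW : (cl.map Prod.fst ++ p).take (w + 1)
            = cl.map Prod.fst ++ p.take (w + 1 - cl.length) := by
          rw [List.take_append, List.take_of_length_le (by simp; omega)]
          simp
        rw [htake, pv_emitS_eq sp cl _ idx htne, hW]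
      have hsf := pv_splitFull_big w (cl.map Prod.fst ++ p) (by simp; omega)
      have hdrop' : (cl.map Prod.fst ++ p).drop (w + 1) = p.drop (w + 1 - cl.length) := by
        rw [List.drop_append, List.drop_of_length_le (by simp; omega)]
        simp
      rw [hdrop'] at hsf
      by_cases hrem : p.drop (w + 1 - cl.length) = []
      · have h0 : pvSplitFull w ([] : List String) = ([], []) := by
          simp [pvSplitFull]
        rw [hrem] at hsf
        rw [h0] at hsf
        refine ⟨[], ?_, ?_, by simp, fun hx => absurd rfl hx⟩
        · rw [hemit, hdrop, hrem, hsf]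
          simp
        · rw [hsf]
          simp
      · obtain ⟨lLab, h1, h2, h3, h4⟩ := ih [] (p.drop (w + 1 - cl.length)) idx tail
          (by
            have : 1 ≤ p.length := by
              cases p with
              | nil => exact absurd rfl hp
              | cons a b => simp
            simp only [List.length_nil, List.length_drop]
            omega)
          (by simp) hrem
        simp only [List.nil_append, List.map_nil] at h1 h2
        refine ⟨lLab, ?_, ?_, h3, h4⟩
        · rw [hemit, hdrop, h1, hsf]
          simp
        · rw [h2, hsf]

theorem pv_emitS_label (sp : Int) (lLab : List (String × Int)) (idx : Int)
    (h : (PySem.List.pyGetD lLab (-1) ("", 0)).2 = idx) :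
    pvEmitS sp lLab = pvEmitA sp idx (lLab.map Prod.fst) := by
  unfold pvEmitS pvEmitA
  rw [h]

theorem pv_M (w : Nat) (sp : Int) :
    ∀ (rest : List (List String)) (p : List String) (cl : List (String × Int)) (idx : Int),
      p ≠ [] → (∀ q ∈ rest, q ≠ []) → cl.length ≤ w →
      pvStreamRec w sp (cl ++ p.map (fun x => (x, idx)) ++ pvLabel (idx + 1) rest)
        = pvARec w sp idx ((cl.map Prod.fst ++ p) :: rest) := by
  intro rest
  induction rest with
  | nil =>
    intro p cl idx hp _ hcl
    obtain ⟨lLab, h1, h2, h3, h4⟩ :=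
      pv_MInner w sp (cl.length + p.length) cl p idx (pvLabel (idx + 1) []) (le_refl _) hcl hp
    rw [pvARec.eq_def]
    simp only [pvLabel] at h1 ⊢
    rw [h1]
    by_cases hl : lLab = []
    · subst hl
      simp only [List.map_nil] at h2
      rw [if_pos h2.symm]
      simp [pvStreamRec, pvARec]
    · rw [if_neg (by rw [← h2]; simpa using hl)]
      rw [List.append_nil, pv_streamRec_short w sp lLab hl (by omega),
        pv_emitS_label sp lLab idx (h4 hl), h2]
  | cons r rs ih =>
    intro p cl idx hp hrest hcl
    obtain ⟨lLab, h1, h2, h3, h4⟩ :=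
      pv_MInner w sp (cl.length + p.length) cl p idx (pvLabel (idx + 1) (r :: rs))
        (le_refl _) hcl hp
    rw [pvARec.eq_def]
    simp only [pvLabel] at h1 ⊢
    rw [h1]
    by_cases hl : lLab = []
    · subst hl
      simp only [List.map_nil] at h2
      rw [if_pos h2.symm]
      have := ih r [] (idx + 1) (hrest r (by simp)) (fun q hq => hrest q (by simp [hq]))
        (by simp)
      simp only [List.nil_append, List.map_nil] at this
      simp only [List.nil_append]
      rw [this]
    · rw [if_neg (by rw [← h2]; simpa using hl)]
      have := ih r lLab (idx + 1) (hrest r (by simp)) (fun q hq => hrest q (by simp [hq])) h3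
      rw [h2] at this
      rw [← List.append_assoc, this]

theorem pv_label_eq : ∀ (texts : List String) (s : Int),
    (PySem.List.enumerate texts s).flatMap
        (fun p => (pvSplitSp p.2).map (fun w => (w, p.1)))
      = pvLabel s (texts.map pvSplitSp) := by
  intro texts
  induction texts with
  | nil => intro s; simp [PySem.List.enumerate, pvLabel]
  | cons t ts ih =>
    intro s
    rw [PySem.List.enumerate_cons]
    simp [pvLabel, ih (s + 1)]

-- ---- negative word_length: A's loops do nothing ----

theorem pv_outer_neg (wl sp : Int) (hwl : wl < 0) :
    ∀ (n idx : Nat) (st : List (List String) × List String),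
      pvOuterA wl sp n idx st = st.2 := by
  intro n
  induction n with
  | zero => intro idx st; rfl
  | succ n ih =>
    intro idx st
    rw [pvOuterA]
    have h1 : pvInnerA wl sp idx (st.1.getD idx []) st = st := by
      unfold pvInnerA
      rw [pv_pyRange_nil_nonpos _ wl hwl (Int.natCast_nonneg _), List.foldl_nil]
    rw [h1, ih]

-- ===== VERDICT (by name: the statement is the Claim_ definition above) =====
theorem text_to_chunks_spec : Claim_equal_text_to_chunks := by
  unfold Claim_equal_text_to_chunks
  intro texts wl sp _ hpre
  unfold Spec_text_to_chunks
  unfold Pre_text_to_chunks at hpre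
  simp only [text_to_chunks, text_to_chunks_alt]
  rw [pv_label_eq texts 0]
  by_cases hwl : 0 < wl
  · have hw : wl.toNat = (wl.toNat - 1) + 1 := by omega
    rw [pv_B_fold wl sp (wl.toNat - 1) hw hwl _ (pvLabel 0 (texts.map pvSplitSp)) []
      (le_refl _), List.nil_append]
    have hA := pv_outer wl sp (wl.toNat - 1) hw hwl (texts.map pvSplitSp).length
      (texts.map pvSplitSp) [] [] rfl
    simp only [List.nil_append, List.length_nil, Nat.cast_zero] at hA
    rw [hA]
    cases texts with
    | nil => simp [pvARec, pvLabel, pvStreamRec]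
    | cons t ts =>
      have hM := pv_M (wl.toNat - 1) sp (ts.map pvSplitSp) (pvSplitSp t) [] 0
        (pv_split_ne_nil t)
        (fun q hq => by
          obtain ⟨t', _, rfl⟩ := List.mem_map.1 hq
          exact pv_split_ne_nil t')
        (by simp)
      simp only [List.nil_append, List.map_nil] at hM
      rw [show pvLabel 0 ((t :: ts).map pvSplitSp)
          = (pvSplitSp t).map (fun x => (x, (0 : Int))) ++ pvLabel (0 + 1) (ts.map pvSplitSp)
          from rfl]
      rw [hM]
      rfl
  · have hneg : wl < 0 := by omega
    rw [pv_outer_neg wl sp hneg,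
      pv_pyRange_nil_nonpos _ wl hneg (Int.natCast_nonneg _), List.foldl_nil]
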